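-- pv_equiv track=rewrite | github.com/Leibniz-IWT/ddgclib | ddgclib/geometry/curved_volume/_1_coeffs_computing.py | _ring1_ring2_smooth
-- ===== SOURCE A (Python) =====
-- def _ring1_ring2_smooth(a: int, b: int, c: int, comp: int, adj_comp):
--     seeds = {a, b, c}
--     r1 = set()
--     for v in seeds:
--         r1 |= set(adj_comp[v].get(comp, set()))
--     r1 -= seeds
--     r2 = set()
--     for u in r1:
--         r2 |= set(adj_comp[u].get(comp, set()))
--     r2 -= (r1 | seeds)
--     return sorted(r1), sorted(r2)
-- ===== SOURCE B (Python) =====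
-- def _ring1_ring2_smooth(a: int, b: int, c: int, comp: int, adj_comp):
--     # sort-merge approach: no hash-set unions/differences; each ring is built by
--     # concatenating the neighbour lists, sorting once, and a single scan that
--     # deduplicates and subtracts the sorted excluded list two-pointer style.
--     seeds = sorted({a, b, c})
--
--     def next_ring(frontier, excluded):
--         pool = []
--         for v in frontier:
--             pool.extend(adj_comp[v].get(comp, ()))
--         pool.sort()
--         out = []
--         exc = excluded
--         prev = None
--         for w in pool:
--             if prev is None or w != prev:
--                 prev = w
--                 while exc and exc[0] < w:
--                     exc = exc[1:]
--                 if not exc or exc[0] != w: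
--                     out.append(w)
--         return out
--
--     r1 = next_ring(seeds, seeds)
--     r2 = next_ring(r1, sorted(seeds + r1))
--     return r1, r2
-- ===== Notes on version B (the rewrite author's own statement) =====
-- stated objective: alternative
-- what changed: Replaces A's hash-set unions and set differences by a sort-merge pipeline: each ring is built by concatenating the neighbour lists, sorting once, and a single scan that deduplicates adjacent equals and subtracts the sorted excluded list two-pointer style (no sets beyond seed dedup).
import Mathlib
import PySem

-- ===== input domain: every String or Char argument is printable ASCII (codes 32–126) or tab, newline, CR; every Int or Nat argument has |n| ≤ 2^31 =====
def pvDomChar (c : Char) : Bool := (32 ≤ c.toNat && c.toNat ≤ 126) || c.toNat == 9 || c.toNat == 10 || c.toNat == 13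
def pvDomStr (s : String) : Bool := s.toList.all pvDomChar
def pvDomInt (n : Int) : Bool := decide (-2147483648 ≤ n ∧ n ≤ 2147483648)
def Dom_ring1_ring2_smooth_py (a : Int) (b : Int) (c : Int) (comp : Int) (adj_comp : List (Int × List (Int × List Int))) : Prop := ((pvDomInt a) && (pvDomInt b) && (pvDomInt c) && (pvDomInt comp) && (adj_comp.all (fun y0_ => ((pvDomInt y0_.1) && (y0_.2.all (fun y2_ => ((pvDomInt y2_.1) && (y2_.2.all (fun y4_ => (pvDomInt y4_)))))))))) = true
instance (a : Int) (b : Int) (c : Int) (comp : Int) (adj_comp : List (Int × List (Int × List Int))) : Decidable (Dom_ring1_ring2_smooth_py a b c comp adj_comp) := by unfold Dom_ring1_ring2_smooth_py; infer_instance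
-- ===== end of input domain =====

-- B replaces A's hash-set unions/differences by a sort-merge pipeline: concatenate
-- the neighbour lists, sort once, and one scan that deduplicates adjacent equals and
-- subtracts the sorted excluded list two-pointer style (objective: alternative).

-- shared accessor: Python's 'adj_comp[v].get(comp, set())' in its total getD form
-- (the adj_comp[v] KeyError case, getD's default, is excluded by Pre_ below)
def pvNbrs (adj_comp : List (Int × List (Int × List Int))) (comp v : Int) : List Int :=
  (PySem.Dict.mk ((PySem.Dict.mk adj_comp).getD v [])).getD comp []

-- ===== PORT A =====
def ring1_ring2_smooth_py (a : Int) (b : Int) (c : Int) (comp : Int) (adj_comp : List (Int × List (Int × List Int))) : List Int × List Int :=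
  let seeds : PySem.Set Int := PySem.Set.ofList [a, b, c]
  let r1 : PySem.Set Int := seeds.foldl
    (fun r v => PySem.Set.union r (PySem.Set.ofList (pvNbrs adj_comp comp v))) PySem.Set.empty
  let r1 := PySem.Set.diff r1 seeds
  let r2 : PySem.Set Int := r1.foldl
    (fun r u => PySem.Set.union r (PySem.Set.ofList (pvNbrs adj_comp comp u))) PySem.Set.empty
  let r2 := PySem.Set.diff r2 (PySem.Set.union r1 seeds)
  (PySem.List.sorted r1 (fun x => x), PySem.List.sorted r2 (fun x => x))

-- ===== PORT B =====
-- B's scan over the sorted pool: 'prev' dedups adjacent equals, 'exc' is the sorted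
-- excluded list consumed from the front ('while exc and exc[0] < w: exc = exc[1:]')
def pvScan : List Int → List Int → Option Int → List Int → List Int
  | [], _exc, _prev, out => out
  | w :: ws, exc, prev, out =>
    if some w = prev then pvScan ws exc prev out
    else
      match exc.dropWhile (fun e => decide (e < w)) with
      | [] => pvScan ws [] (some w) (out ++ [w])
      | e :: t =>
        if e = w then pvScan ws (e :: t) (some w) out
        else pvScan ws (e :: t) (some w) (out ++ [w])

-- 'pool = []; for v in frontier: pool.extend(adj_comp[v].get(comp, ()))'
def pvPool (adj_comp : List (Int × List (Int × List Int))) (comp : Int) (frontier : List Int) : List Int :=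
  frontier.foldl (fun p v => p ++ pvNbrs adj_comp comp v) []

def pvNextRing (adj_comp : List (Int × List (Int × List Int))) (comp : Int)
    (frontier excluded : List Int) : List Int :=
  pvScan (PySem.List.sorted (pvPool adj_comp comp frontier) (fun x => x)) excluded none []

def ring1_ring2_smooth_py_alt (a : Int) (b : Int) (c : Int) (comp : Int) (adj_comp : List (Int × List (Int × List Int))) : List Int × List Int :=
  let seeds := PySem.List.sorted (PySem.Set.ofList [a, b, c]) (fun x => x)
  let r1 := pvNextRing adj_comp comp seeds seeds
  let r2 := pvNextRing adj_comp comp r1 (PySem.List.sorted (seeds ++ r1) (fun x => x))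
  (r1, r2)

-- ===== PRECONDITION & SPEC =====
-- Pre_ excludes exactly the KeyError inputs of A (a vertex whose adjacency dict is
-- accessed — a seed, or a distance-1 neighbour outside the seeds — missing from adj_comp).
def Pre_ring1_ring2_smooth_py (a : Int) (b : Int) (c : Int) (comp : Int) (adj_comp : List (Int × List (Int × List Int))) : Prop :=
  (PySem.Dict.mk adj_comp).contains a = true ∧
  (PySem.Dict.mk adj_comp).contains b = true ∧
  (PySem.Dict.mk adj_comp).contains c = true ∧
  ∀ s ∈ [a, b, c], ∀ w ∈ (PySem.Dict.mk ((PySem.Dict.mk adj_comp).getD s [])).getD comp [],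
    w = a ∨ w = b ∨ w = c ∨ (PySem.Dict.mk adj_comp).contains w = true
instance (a : Int) (b : Int) (c : Int) (comp : Int) (adj_comp : List (Int × List (Int × List Int))) : Decidable (Pre_ring1_ring2_smooth_py a b c comp adj_comp) := by unfold Pre_ring1_ring2_smooth_py; infer_instance

def pvWitness_ring1_ring2_smooth_py : Int × Int × Int × Int × (List (Int × List (Int × List Int))) :=
  (1, 2, 3, 0, [(1, [(0, [4, 2])]), (2, []), (3, [(1, [5])]), (4, [(0, [1, 5])]), (5, [])])

def Spec_ring1_ring2_smooth_py (a : Int) (b : Int) (c : Int) (comp : Int) (adj_comp : List (Int × List (Int × List Int))) (out : List Int × List Int) : Prop := out = ring1_ring2_smooth_py_alt a b c comp adj_comp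
instance (a : Int) (b : Int) (c : Int) (comp : Int) (adj_comp : List (Int × List (Int × List Int))) (out : List Int × List Int) : Decidable (Spec_ring1_ring2_smooth_py a b c comp adj_comp out) := by unfold Spec_ring1_ring2_smooth_py; infer_instance

-- ===== CLAIM (what is proved, stated in full; the proofs are below) =====
def Claim_equal_ring1_ring2_smooth_py : Prop := ∀ (a : Int) (b : Int) (c : Int) (comp : Int) (adj_comp : List (Int × List (Int × List Int))), Dom_ring1_ring2_smooth_py a b c comp adj_comp → Pre_ring1_ring2_smooth_py a b c comp adj_comp → Spec_ring1_ring2_smooth_py a b c comp adj_comp (ring1_ring2_smooth_py a b c comp adj_comp)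

-- ===== LEMMAS AND PROOFS =====

-- dropping excluded elements < w loses no element ≥ w
-- the first surviving element of dropWhile fails the test
theorem pv_head_dropWhile (p : Int → Bool) (l : List Int) (e : Int) (t : List Int)
    (h : l.dropWhile p = e :: t) : p e = false := by
  induction l with
  | nil => simp at h
  | cons x l ih =>
    by_cases hx : p x
    · rw [List.dropWhile_cons_of_pos hx] at h
      exact ih h
    · rw [List.dropWhile_cons_of_neg hx] at h
      cases h
      exact Bool.eq_false_iff.mpr hx

theorem pv_mem_dropWhile_lt (l : List Int) (w x : Int) (hw : w ≤ x) :
    x ∈ l.dropWhile (fun e => decide (e < w)) ↔ x ∈ l := by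
  induction l with
  | nil => simp
  | cons e l ih =>
    by_cases he : e < w
    · rw [List.dropWhile_cons_of_pos (by simpa using he)]
      rw [ih]
      simp only [List.mem_cons]
      constructor
      · exact Or.inr
      · rintro (rfl | h)
        · omega
        · exact h
    · rw [List.dropWhile_cons_of_neg (by simpa using he)]

-- the scan: output is strictly increasing and contains exactly the pool elements
-- outside exc and different from prev (pool and exc sorted, prev below the pool)
theorem pvScan_spec (pool : List Int) : ∀ (exc : List Int) (prev : Option Int) (out : List Int),
    pool.Pairwise (· ≤ ·) → exc.Pairwise (· ≤ ·) →
    (∀ p, prev = some p → ∀ x ∈ pool, p ≤ x) →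
    (∀ o ∈ out, ∃ p, prev = some p ∧ o ≤ p) →
    out.Pairwise (· < ·) →
    (pvScan pool exc prev out).Pairwise (· < ·) ∧
    (∀ y, y ∈ pvScan pool exc prev out ↔ y ∈ out ∨ (y ∈ pool ∧ y ∉ exc ∧ prev ≠ some y)) := by
  induction pool with
  | nil =>
    intro exc prev out _ _ _ _ hout
    refine ⟨hout, fun y => by simp [pvScan]⟩
  | cons w ws ih =>
    intro exc prev out hpool hexc hpb hop hout
    obtain ⟨hw, hws⟩ := List.pairwise_cons.mp hpool
    by_cases hpw : some w = prev
    · -- duplicate of prev: skipped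
      rw [show pvScan (w :: ws) exc prev out = pvScan ws exc prev out by
        simp [pvScan, if_pos hpw]]
      obtain ⟨P, M⟩ := ih exc prev out hws hexc
        (fun p hp x hx => by
          have : p = w := by rw [← hpw] at hp; exact (Option.some_inj.mp hp).symm
          exact this ▸ hw x hx)
        hop hout
      refine ⟨P, fun y => ?_⟩
      rw [M y]
      subst hpw
      simp only [List.mem_cons, ne_eq, Option.some_inj]
      constructor
      · rintro (h | ⟨h1, h2, h3⟩)
        · exact Or.inl h
        · exact Or.inr ⟨Or.inr h1, h2, h3⟩
      · rintro (h | ⟨h1, h2, h3⟩)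
        · exact Or.inl h
        · rcases h1 with rfl | h1
          · exact absurd rfl h3
          · exact Or.inr ⟨h1, h2, h3⟩
    · -- new value w: advance exc past elements < w, then test its head
      have hprev_lt : ∀ p, prev = some p → p < w := by
        intro p hp
        have hle : p ≤ w := hpb p hp w (List.mem_cons_self)
        have hne : p ≠ w := fun h => hpw (by rw [hp, h])
        omega
      have hout_lt : ∀ o ∈ out, o < w := by
        intro o ho
        obtain ⟨p, hp, hle⟩ := hop o ho
        exact lt_of_le_of_lt hle (hprev_lt p hp)
      have hexc' : (exc.dropWhile (fun e => decide (e < w))).Pairwise (· ≤ ·) :=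
        List.Pairwise.sublist (List.dropWhile_sublist _) hexc
      have memExc : ∀ y, w ≤ y →
          (y ∈ exc.dropWhile (fun e => decide (e < w)) ↔ y ∈ exc) :=
        fun y hy => pv_mem_dropWhile_lt exc w y hy
      -- common facts for the two 'w appended' branches
      have hop' : ∀ o ∈ out ++ [w], ∃ p, (some w : Option Int) = some p ∧ o ≤ p := by
        intro o ho
        rcases List.mem_append.mp ho with h | h
        · exact ⟨w, rfl, le_of_lt (hout_lt o h)⟩
        · simp only [List.mem_singleton] at h
          exact ⟨w, rfl, le_of_eq h⟩
      have hout' : (out ++ [w]).Pairwise (· < ·) := by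
        rw [List.pairwise_append]
        exact ⟨hout, List.pairwise_singleton _ _,
          fun o ho x hx => by simp only [List.mem_singleton] at hx; exact hx ▸ hout_lt o ho⟩
      have hpb' : ∀ p, (some w : Option Int) = some p → ∀ x ∈ ws, p ≤ x :=
        fun p hp x hx => (Option.some_inj.mp hp) ▸ hw x hx
      rcases hd : exc.dropWhile (fun e => decide (e < w)) with _ | ⟨e, t⟩
      · -- exc exhausted: w (and everything after) is outside exc
        rw [show pvScan (w :: ws) exc prev out = pvScan ws [] (some w) (out ++ [w]) by
          simp [pvScan, if_neg hpw, hd]]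
        obtain ⟨P, M⟩ := ih [] (some w) (out ++ [w]) hws (List.Pairwise.nil) hpb' hop' hout'
        have hwexc : w ∉ exc := by rw [← memExc w le_rfl, hd]; simp
        refine ⟨P, fun y => ?_⟩
        rw [M y]
        constructor
        · rintro (h | ⟨h1, _, h3⟩)
          · rcases List.mem_append.mp h with h | h
            · exact Or.inl h
            · simp only [List.mem_singleton] at h
              subst h
              exact Or.inr ⟨List.mem_cons_self, hwexc, fun hc => hpw hc.symm⟩
          · have hwy : w ≤ y := hw y h1
            have hyexc : y ∉ exc := by rw [← memExc y hwy, hd]; simp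
            refine Or.inr ⟨List.mem_cons_of_mem _ h1, hyexc, fun hc => ?_⟩
            have := hprev_lt y hc
            exact absurd (hw y h1) (by omega)
        · rintro (h | ⟨h1, h2, h3⟩)
          · exact Or.inl (List.mem_append.mpr (Or.inl h))
          · rcases List.mem_cons.mp h1 with rfl | h1
            · exact Or.inl (List.mem_append.mpr (Or.inr (by simp)))
            · by_cases hyw : y = w
              · exact Or.inl (List.mem_append.mpr (Or.inr (by simp [hyw])))
              · exact Or.inr ⟨h1, by simp, fun hc => hyw (Option.some_inj.mp hc).symm⟩
      · have hwe : w ≤ e := by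
          have := pv_head_dropWhile (fun e => decide (e < w)) exc e t hd
          simpa using this
        by_cases hew : e = w
        · -- head of the remaining excluded list equals w: w is excluded
          subst hew
          rw [show pvScan (e :: ws) exc prev out = pvScan ws (e :: t) (some e) out by
            simp [pvScan, if_neg hpw, hd]]
          obtain ⟨P, M⟩ := ih (e :: t) (some e) out hws (hd ▸ hexc')
            hpb'
            (fun o ho => ⟨e, rfl, le_of_lt (hout_lt o ho)⟩) hout
          have hwexc : e ∈ exc := by
            rw [← memExc e le_rfl, hd]; exact List.mem_cons_self
          refine ⟨P, fun y => ?_⟩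
          rw [M y]
          constructor
          · rintro (h | ⟨h1, h2, h3⟩)
            · exact Or.inl h
            · have hwy : e ≤ y := hw y h1
              have hyexc : y ∉ exc := by rw [← memExc y hwy, hd]; exact h2
              refine Or.inr ⟨List.mem_cons_of_mem _ h1, hyexc, fun hc => ?_⟩
              have := hprev_lt y hc
              exact absurd (hw y h1) (by omega)
          · rintro (h | ⟨h1, h2, h3⟩)
            · exact Or.inl h
            · rcases List.mem_cons.mp h1 with rfl | h1
              · exact absurd hwexc h2
              · have hwy : e ≤ y := hw y h1
                refine Or.inr ⟨h1, by rw [← memExc y hwy, hd] at h2; exact h2, fun hc => ?_⟩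
                have : y = e := Option.some_inj.mp hc.symm
                subst this
                exact h2 hwexc
        · -- head differs from w (and is ≥ w): w is outside exc
          rw [show pvScan (w :: ws) exc prev out = pvScan ws (e :: t) (some w) (out ++ [w]) by
            simp [pvScan, if_neg hpw, hd, hew]]
          obtain ⟨P, M⟩ := ih (e :: t) (some w) (out ++ [w]) hws (hd ▸ hexc') hpb' hop' hout'
          have hwexc : w ∉ exc := by
            rw [← memExc w le_rfl, hd]
            intro hc
            rcases List.mem_cons.mp hc with h | h
            · exact hew h.symm
            · have : ∀ x ∈ t, e ≤ x := (List.pairwise_cons.mp (hd ▸ hexc')).1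
              have hex := this w h
              omega
          refine ⟨P, fun y => ?_⟩
          rw [M y]
          constructor
          · rintro (h | ⟨h1, h2, h3⟩)
            · rcases List.mem_append.mp h with h | h
              · exact Or.inl h
              · simp only [List.mem_singleton] at h
                subst h
                exact Or.inr ⟨List.mem_cons_self, hwexc, fun hc => hpw hc.symm⟩
            · have hwy : w ≤ y := hw y h1
              have hyexc : y ∉ exc := by rw [← memExc y hwy, hd]; exact h2
              refine Or.inr ⟨List.mem_cons_of_mem _ h1, hyexc, fun hc => ?_⟩
              have := hprev_lt y hc
              exact absurd (hw y h1) (by omega)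
          · rintro (h | ⟨h1, h2, h3⟩)
            · exact Or.inl (List.mem_append.mpr (Or.inl h))
            · rcases List.mem_cons.mp h1 with rfl | h1
              · exact Or.inl (List.mem_append.mpr (Or.inr (by simp)))
              · by_cases hyw : y = w
                · exact Or.inl (List.mem_append.mpr (Or.inr (by simp [hyw])))
                · have hwy : w ≤ y := hw y h1
                  refine Or.inr ⟨h1, by rw [← memExc y hwy, hd] at h2; exact h2,
                    fun hc => hyw (Option.some_inj.mp hc).symm⟩

-- B's next_ring: strictly sorted, membership = (a neighbour of the frontier) ∖ excluded
theorem pvNextRing_spec (adj_comp : List (Int × List (Int × List Int))) (comp : Int)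
    (frontier excluded : List Int) (hexc : excluded.Pairwise (· ≤ ·)) :
    (pvNextRing adj_comp comp frontier excluded).Pairwise (· < ·) ∧
    (∀ y, y ∈ pvNextRing adj_comp comp frontier excluded ↔
      (∃ v ∈ frontier, y ∈ pvNbrs adj_comp comp v) ∧ y ∉ excluded) := by
  have hpool : (PySem.List.sorted (pvPool adj_comp comp frontier) (fun x => x)).Pairwise (· ≤ ·) :=
    PySem.List.sorted_pairwise _ _
  obtain ⟨P, M⟩ := pvScan_spec (PySem.List.sorted (pvPool adj_comp comp frontier) (fun x => x))
    excluded none [] hpool hexc (by simp) (by simp) List.Pairwise.nil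
  refine ⟨P, fun y => ?_⟩
  unfold pvNextRing
  rw [M y]
  have hmem : y ∈ PySem.List.sorted (pvPool adj_comp comp frontier) (fun x => x) ↔
      ∃ v ∈ frontier, y ∈ pvNbrs adj_comp comp v := by
    rw [PySem.List.mem_sorted]
    unfold pvPool
    rw [PySem.List.foldl_append_eq_flatMap]
    simp [List.mem_flatMap]
  simp only [List.not_mem_nil, false_or, ne_eq]
  rw [hmem]
  constructor
  · rintro ⟨h1, h2, _⟩; exact ⟨h1, h2⟩
  · rintro ⟨h1, h2⟩; exact ⟨h1, h2, by simp⟩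

-- A's union-accumulating loop
theorem pvUnion_fold (adj_comp : List (Int × List (Int × List Int))) (comp : Int)
    (l : List Int) (s : PySem.Set Int) (hs : s.Nodup) :
    (∀ y : Int, y ∈ l.foldl (fun r v => PySem.Set.union r (PySem.Set.ofList (pvNbrs adj_comp comp v))) s ↔
        y ∈ s ∨ ∃ v ∈ l, y ∈ pvNbrs adj_comp comp v) ∧
    (l.foldl (fun r v => PySem.Set.union r (PySem.Set.ofList (pvNbrs adj_comp comp v))) s).Nodup := by
  induction l generalizing s with
  | nil => exact ⟨fun y => by simp, hs⟩
  | cons v vs ih =>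
    obtain ⟨m, nd⟩ := ih (PySem.Set.union s (PySem.Set.ofList (pvNbrs adj_comp comp v)))
      (PySem.Set.nodup_union _ _ hs)
    refine ⟨fun y => ?_, nd⟩
    simp only [List.foldl_cons]
    rw [m, PySem.Set.mem_union, PySem.Set.mem_ofList]
    constructor
    · rintro ((h | h) | ⟨u, hu, hn⟩)
      · exact Or.inl h
      · exact Or.inr ⟨v, by simp, h⟩
      · exact Or.inr ⟨u, by simp [hu], hn⟩
    · rintro (h | ⟨u, hu, hn⟩)
      · exact Or.inl (Or.inl h)
      · rcases List.mem_cons.mp hu with rfl | hu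
        · exact Or.inl (Or.inr hn)
        · exact Or.inr ⟨u, hu, hn⟩

-- named pieces of A (proof-only abbreviations)
def pvSeeds (a b c : Int) : PySem.Set Int := PySem.Set.ofList [a, b, c]
def pvU1 (adj_comp : List (Int × List (Int × List Int))) (comp a b c : Int) : PySem.Set Int :=
  (pvSeeds a b c).foldl
    (fun r v => PySem.Set.union r (PySem.Set.ofList (pvNbrs adj_comp comp v))) PySem.Set.empty
def pvR1A (adj_comp : List (Int × List (Int × List Int))) (comp a b c : Int) : PySem.Set Int :=
  PySem.Set.diff (pvU1 adj_comp comp a b c) (pvSeeds a b c)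
def pvR2A (adj_comp : List (Int × List (Int × List Int))) (comp a b c : Int) : PySem.Set Int :=
  PySem.Set.diff
    ((pvR1A adj_comp comp a b c).foldl
      (fun r u => PySem.Set.union r (PySem.Set.ofList (pvNbrs adj_comp comp u))) PySem.Set.empty)
    (PySem.Set.union (pvR1A adj_comp comp a b c) (pvSeeds a b c))

-- two strictly increasing lists with the same members are equal
theorem pvStrictEq (l l' : List Int) (h1 : l.Pairwise (· < ·)) (h2 : l'.Pairwise (· < ·))
    (h : ∀ y, y ∈ l ↔ y ∈ l') : l = l' := by
  have nd1 : l.Nodup := h1.imp ne_of_lt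
  have nd2 : l'.Nodup := h2.imp ne_of_lt
  have hp : l.Perm l' := (List.perm_ext_iff_of_nodup nd1 nd2).mpr h
  exact hp.eq_of_pairwise (fun a b _ _ hab hba => le_antisymm hab hba)
    (List.Pairwise.imp le_of_lt h1) (List.Pairwise.imp le_of_lt h2)

theorem ring1_ring2_eq (a b c comp : Int) (adj_comp : List (Int × List (Int × List Int))) :
    ring1_ring2_smooth_py a b c comp adj_comp = ring1_ring2_smooth_py_alt a b c comp adj_comp := by
  have hA : ring1_ring2_smooth_py a b c comp adj_comp =
      (PySem.List.sorted (pvR1A adj_comp comp a b c) (fun x => x),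
       PySem.List.sorted (pvR2A adj_comp comp a b c) (fun x => x)) := rfl
  have hseedsL : ∀ v : Int, v ∈ pvSeeds a b c ↔ v ∈ ([a, b, c] : List Int) := fun v =>
    PySem.Set.mem_ofList _ _
  -- B's seeds list
  have hseedsB : ∀ v : Int, v ∈ PySem.List.sorted (pvSeeds a b c) (fun x => x) ↔
      v ∈ ([a, b, c] : List Int) := by
    intro v; rw [PySem.List.mem_sorted]; exact hseedsL v
  have hseedsSorted : (PySem.List.sorted (pvSeeds a b c) (fun x => x)).Pairwise (· ≤ ·) :=
    PySem.List.sorted_pairwise _ _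
  -- A's ring 1 as a predicate
  obtain ⟨u1m, u1nd⟩ := pvUnion_fold adj_comp comp (pvSeeds a b c) PySem.Set.empty List.nodup_nil
  have r1Am : ∀ y : Int, y ∈ pvR1A adj_comp comp a b c ↔
      ((∃ v ∈ ([a, b, c] : List Int), y ∈ pvNbrs adj_comp comp v) ∧ y ∉ ([a, b, c] : List Int)) := by
    intro y
    unfold pvR1A pvU1
    rw [PySem.Set.mem_diff, u1m y, hseedsL y]
    simp only [hseedsL, PySem.Set.empty, List.not_mem_nil, false_or]
  have r1And : (pvR1A adj_comp comp a b c).Nodup := by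
    unfold pvR1A pvU1; exact PySem.Set.nodup_diff _ _ u1nd
  -- A's ring 1 sorted is strictly increasing
  have r1Asorted : (PySem.List.sorted (pvR1A adj_comp comp a b c) (fun x => x)).Pairwise (· < ·) := by
    have hle : (PySem.List.sorted (pvR1A adj_comp comp a b c) (fun x => x)).Pairwise (· ≤ ·) :=
      PySem.List.sorted_pairwise _ _
    have hnd : (PySem.List.sorted (pvR1A adj_comp comp a b c) (fun x => x)).Nodup :=
      (PySem.List.sorted_perm _ _ _).symm.nodup r1And
    exact (hle.and hnd).imp (fun h => lt_of_le_of_ne h.1 h.2)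
  -- B's ring 1
  obtain ⟨b1P, b1M⟩ := pvNextRing_spec adj_comp comp
    (PySem.List.sorted (pvSeeds a b c) (fun x => x))
    (PySem.List.sorted (pvSeeds a b c) (fun x => x)) hseedsSorted
  have ring1_eq : PySem.List.sorted (pvR1A adj_comp comp a b c) (fun x => x) =
      pvNextRing adj_comp comp (PySem.List.sorted (pvSeeds a b c) (fun x => x))
        (PySem.List.sorted (pvSeeds a b c) (fun x => x)) := by
    apply pvStrictEq _ _ r1Asorted b1P
    intro y
    rw [PySem.List.mem_sorted, r1Am y, b1M y]
    constructor
    · rintro ⟨⟨v, hv, hn⟩, h2⟩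
      exact ⟨⟨v, (hseedsB v).mpr hv, hn⟩, fun hc => h2 ((hseedsB y).mp hc)⟩
    · rintro ⟨⟨v, hv, hn⟩, h2⟩
      exact ⟨⟨v, (hseedsB v).mp hv, hn⟩, fun hc => h2 ((hseedsB y).mpr hc)⟩
  -- A's ring 2 as a predicate
  obtain ⟨u2m, u2nd⟩ := pvUnion_fold adj_comp comp (pvR1A adj_comp comp a b c)
    PySem.Set.empty List.nodup_nil
  have r2Am : ∀ y : Int, y ∈ pvR2A adj_comp comp a b c ↔
      ((∃ u ∈ pvR1A adj_comp comp a b c, y ∈ pvNbrs adj_comp comp u) ∧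
        ¬(y ∈ pvR1A adj_comp comp a b c ∨ y ∈ ([a, b, c] : List Int))) := by
    intro y
    unfold pvR2A
    rw [PySem.Set.mem_diff, u2m y, PySem.Set.mem_union, hseedsL y]
    simp only [PySem.Set.empty, List.not_mem_nil, false_or]
  have r2And : (pvR2A adj_comp comp a b c).Nodup := by
    unfold pvR2A; exact PySem.Set.nodup_diff _ _ u2nd
  have r2Asorted : (PySem.List.sorted (pvR2A adj_comp comp a b c) (fun x => x)).Pairwise (· < ·) := by
    have hle : (PySem.List.sorted (pvR2A adj_comp comp a b c) (fun x => x)).Pairwise (· ≤ ·) :=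
      PySem.List.sorted_pairwise _ _
    have hnd : (PySem.List.sorted (pvR2A adj_comp comp a b c) (fun x => x)).Nodup :=
      (PySem.List.sorted_perm _ _ _).symm.nodup r2And
    exact (hle.and hnd).imp (fun h => lt_of_le_of_ne h.1 h.2)
  -- B's ring 1 list has exactly A's ring-1 members
  have r1Bm : ∀ y : Int,
      y ∈ pvNextRing adj_comp comp (PySem.List.sorted (pvSeeds a b c) (fun x => x))
        (PySem.List.sorted (pvSeeds a b c) (fun x => x)) ↔ y ∈ pvR1A adj_comp comp a b c := by
    intro y; rw [← ring1_eq, PySem.List.mem_sorted]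
  -- B's excluded list for level 2
  have hexc2Sorted : (PySem.List.sorted
      (PySem.List.sorted (pvSeeds a b c) (fun x => x) ++
        pvNextRing adj_comp comp (PySem.List.sorted (pvSeeds a b c) (fun x => x))
          (PySem.List.sorted (pvSeeds a b c) (fun x => x))) (fun x => x)).Pairwise (· ≤ ·) :=
    PySem.List.sorted_pairwise _ _
  obtain ⟨b2P, b2M⟩ := pvNextRing_spec adj_comp comp
    (pvNextRing adj_comp comp (PySem.List.sorted (pvSeeds a b c) (fun x => x))
      (PySem.List.sorted (pvSeeds a b c) (fun x => x)))
    (PySem.List.sorted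
      (PySem.List.sorted (pvSeeds a b c) (fun x => x) ++
        pvNextRing adj_comp comp (PySem.List.sorted (pvSeeds a b c) (fun x => x))
          (PySem.List.sorted (pvSeeds a b c) (fun x => x))) (fun x => x)) hexc2Sorted
  have ring2_eq : PySem.List.sorted (pvR2A adj_comp comp a b c) (fun x => x) =
      pvNextRing adj_comp comp
        (pvNextRing adj_comp comp (PySem.List.sorted (pvSeeds a b c) (fun x => x))
          (PySem.List.sorted (pvSeeds a b c) (fun x => x)))
        (PySem.List.sorted
          (PySem.List.sorted (pvSeeds a b c) (fun x => x) ++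
            pvNextRing adj_comp comp (PySem.List.sorted (pvSeeds a b c) (fun x => x))
              (PySem.List.sorted (pvSeeds a b c) (fun x => x))) (fun x => x)) := by
    apply pvStrictEq _ _ r2Asorted b2P
    intro y
    rw [PySem.List.mem_sorted, r2Am y, b2M y, PySem.List.mem_sorted, List.mem_append]
    constructor
    · rintro ⟨⟨u, hu, hn⟩, h2⟩
      refine ⟨⟨u, (r1Bm u).mpr hu, hn⟩, fun hc => ?_⟩
      rcases hc with hc | hc
      · exact h2 (Or.inr ((hseedsB y).mp hc))
      · exact h2 (Or.inl ((r1Bm y).mp hc))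
    · rintro ⟨⟨u, hu, hn⟩, h2⟩
      refine ⟨⟨u, (r1Bm u).mp hu, hn⟩, fun hc => ?_⟩
      rcases hc with hc | hc
      · exact h2 (Or.inr ((r1Bm y).mpr hc))
      · exact h2 (Or.inl ((hseedsB y).mpr hc))
  have hB : ring1_ring2_smooth_py_alt a b c comp adj_comp =
      (pvNextRing adj_comp comp (PySem.List.sorted (pvSeeds a b c) (fun x => x))
        (PySem.List.sorted (pvSeeds a b c) (fun x => x)),
       pvNextRing adj_comp comp
        (pvNextRing adj_comp comp (PySem.List.sorted (pvSeeds a b c) (fun x => x))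
          (PySem.List.sorted (pvSeeds a b c) (fun x => x)))
        (PySem.List.sorted
          (PySem.List.sorted (pvSeeds a b c) (fun x => x) ++
            pvNextRing adj_comp comp (PySem.List.sorted (pvSeeds a b c) (fun x => x))
              (PySem.List.sorted (pvSeeds a b c) (fun x => x))) (fun x => x))) := rfl
  rw [hA, hB, ring1_eq, ring2_eq]

-- ===== VERDICT (by name: the statement is the Claim_ definition above) =====
theorem ring1_ring2_smooth_py_spec : Claim_equal_ring1_ring2_smooth_py := by
  intro a b c comp adj_comp _ _
  exact ring1_ring2_eq a b c comp adj_comp
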